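-- pv_equiv track=rewrite | github.com/antismash/antismash | antismash/common/secmet/feature.py | _sanitise_id_value
-- ===== SOURCE A (Python) =====
-- from typing import Any, Dict, Iterable, List, Optional, Tuple, Union
--
-- def _sanitise_id_value(name: Optional[str]) -> Optional[str]:
--     """ Ensures a name doesn't contain characters that will break external programs"""
--     if name is None:
--         return None
--     name = str(name)
--     illegal_chars = set("!\"#$%&()*+,:; \r\n\t=>?@[]^`'{|}/ ")
--     for char in set(name).intersection(illegal_chars):
--         name = name.replace(char, "_")
--     return name
-- ===== SOURCE B (Python) =====
-- def _sanitise_id_value(name):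
--     """ Ensures a name doesn't contain characters that will break external programs"""
--     if name is None:
--         return None
--     name = str(name)
--     illegal_chars = "!\"#$%&()*+,:; \r\n\t=>?@[]^`'{|}/ "
--     out = []
--     for ch in name:
--         out.append('_' if ch in illegal_chars else ch)
--     return ''.join(out)
-- ===== Notes on version B (the rewrite author's own statement) =====
-- stated objective: simpler
-- what changed: A loops over the distinct illegal characters present in the name and does a whole-string replace per character; B makes one left-to-right pass over the name with an output accumulator, emitting an underscore for each illegal character.
import Mathlib
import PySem

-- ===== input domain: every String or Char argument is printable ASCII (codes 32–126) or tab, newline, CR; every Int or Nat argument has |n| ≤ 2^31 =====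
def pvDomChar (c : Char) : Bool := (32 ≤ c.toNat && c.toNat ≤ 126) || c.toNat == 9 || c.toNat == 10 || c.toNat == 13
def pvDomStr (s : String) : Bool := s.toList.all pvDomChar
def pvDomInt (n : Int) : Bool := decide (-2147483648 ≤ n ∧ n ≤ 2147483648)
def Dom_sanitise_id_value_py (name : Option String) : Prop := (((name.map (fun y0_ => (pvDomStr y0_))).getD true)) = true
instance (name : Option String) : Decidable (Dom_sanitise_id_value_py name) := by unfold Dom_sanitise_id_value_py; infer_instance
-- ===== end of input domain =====

-- B replaces A's per-illegal-character whole-string replace loop with one left-to-right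
-- accumulator pass over the name (simpler; return value only, no side effects involved).

-- ===== PORT A =====
-- the illegal-character set literal of the Python source
def pvIllegalChars : PySem.Set Char :=
  PySem.Set.ofList "!\"#$%&()*+,:; \r\n\t=>?@[]^`'{|}/ ".toList

def sanitise_id_value_py (name : Option String) : Option String :=
  match name with
  | none => none
  | some n =>
      -- for char in set(name).intersection(illegal_chars): name = name.replace(char, "_")
      -- (the result does not depend on the set's iteration order, proved below)
      some ((PySem.Set.inter (PySem.Set.ofList n.toList) pvIllegalChars).foldl
        (fun s c => PySem.Str.replace s (String.ofList [c]) "_") n)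

-- ===== PORT B =====
-- the loop `for ch in name: out.append('_' if ch in illegal_chars else ch)` as a
-- tail recursion over the remaining characters, carrying the reversed `out` list
def pvSanitiseLoop (illegal : List Char) : List Char → List Char → List Char
  | out, [] => out.reverse
  | out, ch :: rest =>
      pvSanitiseLoop illegal ((if illegal.contains ch then '_' else ch) :: out) rest

def sanitise_id_value_py_alt (name : Option String) : Option String :=
  match name with
  | none => none
  | some n =>
      some (String.ofList
        (pvSanitiseLoop "!\"#$%&()*+,:; \r\n\t=>?@[]^`'{|}/ ".toList [] n.toList))

-- ===== PRECONDITION & SPEC =====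
def Spec_sanitise_id_value_py (name : Option String) (out : Option String) : Prop := out = sanitise_id_value_py_alt name
instance (name : Option String) (out : Option String) : Decidable (Spec_sanitise_id_value_py name out) := by unfold Spec_sanitise_id_value_py; infer_instance

-- ===== CLAIM (what is proved, stated in full; the proofs are below) =====
def Claim_equal_sanitise_id_value_py : Prop := ∀ (name : Option String), Dom_sanitise_id_value_py name → Spec_sanitise_id_value_py name (sanitise_id_value_py name)

-- ===== LEMMAS AND PROOFS =====

-- replacing a single character by '_' is a character map
lemma replace_go_single (c : Char) :
    ∀ (l : List Char) (fuel : Nat) (acc : List Char), l.length ≤ fuel →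
      PySem.Chars.replace.go [c] ['_'] fuel l acc
        = acc.reverse ++ l.map (fun x => if x == c then '_' else x) := by
  intro l
  induction l with
  | nil =>
      intro fuel acc _
      cases fuel <;> simp [PySem.Chars.replace.go]
  | cons d t ih =>
      intro fuel acc h
      cases fuel with
      | zero => simp at h
      | succ fuel =>
          have hlen : t.length ≤ fuel := by simp at h; omega
          by_cases hcd : c = d
          · subst hcd
            simp [PySem.Chars.replace.go, List.isPrefixOf, ih _ _ hlen]
          · simp [PySem.Chars.replace.go, List.isPrefixOf, hcd, ih _ _ hlen,
                  Ne.symm hcd, beq_iff_eq]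

lemma replace_single (s : List Char) (c : Char) :
    PySem.Chars.replace s [c] ['_'] = s.map (fun x => if x == c then '_' else x) := by
  simp [PySem.Chars.replace, replace_go_single c s s.length [] le_rfl]

-- folding single-character replaces over any list L of characters substitutes every member of L
lemma foldl_replace_chars (L : List Char) :
    ∀ (s : List Char),
      L.foldl (fun s c => PySem.Chars.replace s [c] ['_']) s
        = s.map (fun x => if x ∈ L then '_' else x) := by
  induction L with
  | nil => intro s; simp
  | cons c L' ih =>
      intro s
      simp only [List.foldl_cons]
      rw [ih, replace_single, List.map_map]
      refine List.map_congr_left ?_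
      intro x _
      by_cases hx : x = c
      · subst hx; simp
      · simp [Function.comp, hx, beq_iff_eq]

-- the String-level fold of A computes the List-Char-level fold
lemma foldl_str_replace (L : List Char) :
    ∀ (s : String),
      (L.foldl (fun s c => PySem.Str.replace s (String.ofList [c]) "_") s).toList
        = L.foldl (fun t c => PySem.Chars.replace t [c] ['_']) s.toList := by
  induction L with
  | nil => intro s; simp
  | cons c L' ih =>
      intro s
      simp only [List.foldl_cons]
      rw [ih, PySem.Str.toList_replace]
      congr 1 <;> simp [String.toList_ofList]

-- B's accumulator loop is the character map
lemma pvSanitiseLoop_eq (illegal : List Char) :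
    ∀ (l out : List Char),
      pvSanitiseLoop illegal out l
        = out.reverse ++ l.map (fun c => if illegal.contains c then '_' else c) := by
  intro l
  induction l with
  | nil => intro out; simp [pvSanitiseLoop]
  | cons c t ih => intro out; simp [pvSanitiseLoop, ih]

-- ===== VERDICT (by name: the statement is the Claim_ definition above) =====
theorem sanitise_id_value_py_spec : Claim_equal_sanitise_id_value_py := by
  intro name _
  unfold Spec_sanitise_id_value_py
  cases name with
  | none => rfl
  | some n =>
      simp only [sanitise_id_value_py, sanitise_id_value_py_alt, Option.some.injEq]
      apply String.ext
      rw [foldl_str_replace, foldl_replace_chars, pvSanitiseLoop_eq]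
      simp only [String.toList_ofList, List.reverse_nil, List.nil_append]
      refine List.map_congr_left ?_
      intro x hx
      congr 1
      simp only [PySem.Set.mem_inter, PySem.Set.mem_ofList, List.contains_eq_mem,
        decide_eq_true_eq, pvIllegalChars]
      simp [hx]
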